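-- pv_equiv track=rewrite | github.com/maheer425/connect_4 | Heuristics.py | horizontalStreak
-- ===== SOURCE A (Python) =====
-- def horizontalStreak(x, y, board, streak):
-- 	consecutiveCount = 0
-- 	for column in range(x, 7):
-- 		if board[column][y].lower() == board[x][y].lower():
-- 			consecutiveCount += 1
-- 		else:
-- 			break
--
-- 	if consecutiveCount >= streak:
-- 		return 1
-- 	else:
-- 		return 0
-- ===== SOURCE B (Python) =====
-- def horizontalStreak(x, y, board, streak):
--     def run(c):
--         if c >= 7 or board[c][y].lower() != board[x][y].lower():
--             return 0
--         return 1 + run(c + 1)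
--     return 1 if run(x) >= streak else 0
-- ===== Notes on version B (the rewrite author's own statement) =====
-- stated objective: simpler
-- what changed: Replaces A's accumulator loop plus threshold comparison by a self-contained recursive run-length function (0 at the first mismatch or column 7, else 1 + rest) compared with streak in one expression; Pre_ excludes only inputs where A raises IndexError while scanning.
import Mathlib
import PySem

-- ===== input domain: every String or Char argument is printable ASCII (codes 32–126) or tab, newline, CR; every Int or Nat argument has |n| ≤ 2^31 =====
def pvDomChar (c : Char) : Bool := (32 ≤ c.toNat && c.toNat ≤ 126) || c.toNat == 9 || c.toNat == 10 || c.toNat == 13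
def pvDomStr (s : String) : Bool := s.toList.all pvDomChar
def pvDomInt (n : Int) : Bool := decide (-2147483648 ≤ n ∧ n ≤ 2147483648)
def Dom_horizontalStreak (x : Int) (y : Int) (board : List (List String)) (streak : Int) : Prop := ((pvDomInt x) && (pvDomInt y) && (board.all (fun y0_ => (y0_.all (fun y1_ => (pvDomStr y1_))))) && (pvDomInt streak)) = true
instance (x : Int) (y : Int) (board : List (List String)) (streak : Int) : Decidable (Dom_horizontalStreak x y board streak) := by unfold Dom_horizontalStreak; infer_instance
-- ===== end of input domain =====

-- B replaces A's accumulator loop + threshold comparison by a self-contained recursive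
-- run-length function (0 at the first mismatch or column 7, else 1 + rest) compared with
-- streak in one expression: a simpler decomposition of the same computation.


-- ===== PORT A =====
-- Python's board[c][y] (negative indices wrap; none = IndexError)
def pvCell (board : List (List String)) (y : Int) (c : Int) : Option String :=
  (PySem.List.pyGet? board c).bind (fun row => PySem.List.pyGet? row y)

-- A's for-loop over range(x, 7) counting consecutive matches, break on mismatch.
-- On 'none' (Python raises IndexError there, excluded by Pre_) the port just stops.
def hsLoop (board : List (List String)) (y : Int) (target : String) (c : Int) (acc : Int) : Int :=
  if c < 7 then
    match pvCell board y c with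
    | some s => if PySem.Str.lower s = target then hsLoop board y target (c + 1) (acc + 1) else acc
    | none => acc
  else acc
termination_by (7 - c).toNat
decreasing_by omega

def horizontalStreak (x : Int) (y : Int) (board : List (List String)) (streak : Int) : Int :=
  let target := PySem.Str.lower ((pvCell board y x).getD "")
  let consecutiveCount := hsLoop board y target x 0
  if streak ≤ consecutiveCount then 1 else 0

-- ===== PORT B =====
-- B's inner 'run(c)': 0 at column 7 or first case-insensitive mismatch with board[x][y],
-- else 1 + run(c+1). A missing cell (IndexError in Python, excluded by Pre_) yields 0.
def hsRun (x : Int) (y : Int) (board : List (List String)) (c : Int) : Int :=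
  if 7 ≤ c then 0
  else
    match (PySem.List.pyGet? board c).bind (fun row => PySem.List.pyGet? row y),
          (PySem.List.pyGet? board x).bind (fun row => PySem.List.pyGet? row y) with
    | some s, some t =>
        if PySem.Str.lower s ≠ PySem.Str.lower t then 0 else 1 + hsRun x y board (c + 1)
    | _, _ => 0
termination_by (7 - c).toNat
decreasing_by omega

def horizontalStreak_alt (x : Int) (y : Int) (board : List (List String)) (streak : Int) : Int :=
  if streak ≤ hsRun x y board x then 1 else 0

-- ===== PRECONDITION & SPEC =====
-- board[d][y] equals board[x][y] case-insensitively (target is that lowered reference cell)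
def pvMatch (board : List (List String)) (y : Int) (target : String) (d : Int) : Bool :=
  match pvCell board y d with
  | some s => PySem.Str.lower s == target
  | none => false

-- Pre_ holds exactly where the Python A returns (excluded: only IndexError): either the
-- scanned range is empty (7 ≤ x), or the start cell board[x][y] exists and every later
-- scanned column c < 7 that the scan actually reaches (its whole prefix still matches
-- the start cell) is itself in range.
def Pre_horizontalStreak (x : Int) (y : Int) (board : List (List String)) (streak : Int) : Prop :=
  7 ≤ x ∨
    ((pvCell board y x).isSome = true ∧
      ∀ c ∈ PySem.List.pyRange (x + 1) 7 1,
        (∀ d ∈ PySem.List.pyRange x c 1,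
            pvMatch board y (PySem.Str.lower ((pvCell board y x).getD "")) d = true) →
          (pvCell board y c).isSome = true)
instance (x : Int) (y : Int) (board : List (List String)) (streak : Int) : Decidable (Pre_horizontalStreak x y board streak) := by unfold Pre_horizontalStreak; infer_instance

def pvWitness_horizontalStreak : Int × Int × List (List String) × Int :=
  (0, 0, [["a"], ["a"], ["a"], ["a"], ["a"], ["a"], ["a"]], 4)

def Spec_horizontalStreak (x : Int) (y : Int) (board : List (List String)) (streak : Int) (out : Int) : Prop := out = horizontalStreak_alt x y board streak
instance (x : Int) (y : Int) (board : List (List String)) (streak : Int) (out : Int) : Decidable (Spec_horizontalStreak x y board streak out) := by unfold Spec_horizontalStreak; infer_instance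

-- ===== CLAIM (what is proved, stated in full; the proofs are below) =====
def Claim_equal_horizontalStreak : Prop := ∀ (x : Int) (y : Int) (board : List (List String)) (streak : Int), Dom_horizontalStreak x y board streak → Pre_horizontalStreak x y board streak → Spec_horizontalStreak x y board streak (horizontalStreak x y board streak)

-- ===== LEMMAS AND PROOFS =====

theorem hsLoop_stop (board : List (List String)) (y : Int) (t : String) (c acc : Int)
    (h : ¬ c < 7) : hsLoop board y t c acc = acc := by
  rw [hsLoop]; simp [h]

theorem hsLoop_none (board : List (List String)) (y : Int) (t : String) (c acc : Int)
    (h7 : c < 7) (hg : pvCell board y c = none) : hsLoop board y t c acc = acc := by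
  rw [hsLoop]; simp [h7, hg]

theorem hsLoop_match (board : List (List String)) (y : Int) (t : String) (c acc : Int) (s : String)
    (h7 : c < 7) (hg : pvCell board y c = some s) (hm : PySem.Str.lower s = t) :
    hsLoop board y t c acc = hsLoop board y t (c + 1) (acc + 1) := by
  rw [hsLoop]; simp [h7, hg, hm]

theorem hsLoop_mismatch (board : List (List String)) (y : Int) (t : String) (c acc : Int) (s : String)
    (h7 : c < 7) (hg : pvCell board y c = some s) (hm : ¬ PySem.Str.lower s = t) :
    hsLoop board y t c acc = acc := by
  rw [hsLoop]; simp [h7, hg, hm]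

theorem hsLoop_acc (board : List (List String)) (y : Int) (t : String) :
    ∀ (n : Nat) (c : Int), (7 - c).toNat = n →
      ∀ acc : Int, hsLoop board y t c acc = acc + hsLoop board y t c 0 := by
  intro n
  induction n with
  | zero =>
    intro c hc acc
    have h7 : ¬ c < 7 := by omega
    rw [hsLoop_stop board y t c acc h7, hsLoop_stop board y t c 0 h7]
    ring
  | succ k ih =>
    intro c hc acc
    have h7 : c < 7 := by omega
    cases hg : pvCell board y c with
    | none =>
      rw [hsLoop_none board y t c acc h7 hg, hsLoop_none board y t c 0 h7 hg]
      ring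
    | some s =>
      by_cases hm : PySem.Str.lower s = t
      · rw [hsLoop_match board y t c acc s h7 hg hm, hsLoop_match board y t c 0 s h7 hg hm]
        have hk : (7 - (c + 1)).toNat = k := by omega
        rw [ih (c + 1) hk (acc + 1), ih (c + 1) hk (0 + 1)]
        ring
      · rw [hsLoop_mismatch board y t c acc s h7 hg hm, hsLoop_mismatch board y t c 0 s h7 hg hm]
        ring

-- with the start cell present, A's count from any column equals B's recursive run length
theorem hsLoop_eq_hsRun (board : List (List String)) (y x : Int) (sx : String)
    (hx : pvCell board y x = some sx) :
    ∀ (n : Nat) (c : Int), (7 - c).toNat = n →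
      hsLoop board y (PySem.Str.lower sx) c 0 = hsRun x y board c := by
  intro n
  induction n with
  | zero =>
    intro c hc
    rw [hsLoop_stop board y _ c 0 (by omega), hsRun]
    simp [show (7:Int) ≤ c by omega]
  | succ k ih =>
    intro c hc
    have h7 : c < 7 := by omega
    rw [hsRun]
    simp only [show ¬ (7:Int) ≤ c by omega, if_false]
    have hx' : (PySem.List.pyGet? board x).bind (fun row => PySem.List.pyGet? row y) = some sx := hx
    cases hg : pvCell board y c with
    | none =>
      have hg' : (PySem.List.pyGet? board c).bind (fun row => PySem.List.pyGet? row y) = none := hg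
      rw [hsLoop_none board y _ c 0 h7 hg]
      simp [hg', hx']
    | some s =>
      have hg' : (PySem.List.pyGet? board c).bind (fun row => PySem.List.pyGet? row y) = some s := hg
      by_cases hm : PySem.Str.lower s = PySem.Str.lower sx
      · rw [hsLoop_match board y _ c 0 s h7 hg hm,
          hsLoop_acc board y _ (7 - (c + 1)).toNat (c + 1) rfl (0 + 1),
          ih (c + 1) (by omega)]
        simp [hg', hx', hm]
      · rw [hsLoop_mismatch board y _ c 0 s h7 hg hm]
        simp [hg', hx', hm]

-- ===== VERDICT (by name: the statement is the Claim_ definition above) =====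
theorem horizontalStreak_spec : Claim_equal_horizontalStreak := by
  intro x y board streak _hDom hPre
  unfold Spec_horizontalStreak horizontalStreak horizontalStreak_alt
  dsimp only
  by_cases hx7 : 7 ≤ x
  · rw [hsLoop_stop board y _ x 0 (by omega), hsRun]
    simp [hx7]
  · rcases hPre with h | ⟨hx, _⟩
    · omega
    · obtain ⟨sx, hsx⟩ := Option.isSome_iff_exists.mp hx
      simp only [hsx, Option.getD_some,
        hsLoop_eq_hsRun board y x sx hsx (7 - x).toNat x rfl]
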